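-- pv_equiv track=rewrite | github.com/MrBrantCode/unitest_baseline | mut_generate/mist_train_cf/cf_38137/solution.py | process_data_entries
-- ===== SOURCE A (Python) =====
-- def process_data_entries(data):
--     code_count = {}
--     result = {}
--
--     for code, name in data:
--         if code in code_count:
--             code_count[code] += 1
--         else:
--             code_count[code] = 1
--
--         if code_count[code] > 1:
--             key = f"{code}_{code_count[code]}"
--         else:
--             key = code
--
--         result[key] = name
--
--     return result
-- ===== SOURCE B (Python) =====
-- def process_data_entries(data):
--     entries = list(data)
--     # Stage 1: group-by pass — index of every occurrence of each code, in order.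
--     groups = {}
--     for i, (code, _name) in enumerate(entries):
--         groups.setdefault(code, []).append(i)
--     # Stage 2: assign each position its key from its rank inside its code's group.
--     keys = [""] * len(entries)
--     for code, idxs in groups.items():
--         for rank, i in enumerate(idxs, start=1):
--             keys[i] = code if rank == 1 else f"{code}_{rank}"
--     # Stage 3: merge back in original order.
--     result = {}
--     for key, (_code, name) in zip(keys, entries):
--         result[key] = name
--     return result
-- ===== Notes on version B (the rewrite author's own statement) =====
-- stated objective: alternative
-- what changed: B replaces A's single pass with a maintained count dictionary by a three-stage group-by: it first builds an index of occurrence positions per code, then assigns every position its key from its rank inside its group, and finally merges keys and names back in original order.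
import Mathlib
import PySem

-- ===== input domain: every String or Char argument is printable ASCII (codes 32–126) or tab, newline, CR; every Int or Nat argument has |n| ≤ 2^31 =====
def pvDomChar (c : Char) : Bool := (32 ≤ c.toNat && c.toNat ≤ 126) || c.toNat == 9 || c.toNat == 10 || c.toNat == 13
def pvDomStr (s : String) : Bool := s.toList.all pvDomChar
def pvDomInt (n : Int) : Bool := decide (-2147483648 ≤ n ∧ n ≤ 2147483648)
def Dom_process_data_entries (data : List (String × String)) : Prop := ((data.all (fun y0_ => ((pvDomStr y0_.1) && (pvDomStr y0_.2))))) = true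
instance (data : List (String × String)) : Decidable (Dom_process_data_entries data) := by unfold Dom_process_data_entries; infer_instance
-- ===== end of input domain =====

-- B replaces A's single pass with a maintained count dictionary by a three-stage
-- group-by (occurrence-index groups per code, rank-derived keys per position,
-- merge in original order); objective: alternative decomposition, not faster.

-- ===== PORT A =====
-- A's for-loop, carrying (code_count, result)
def pvALoop : List (String × String) → PySem.Dict String Int → PySem.Dict String String → PySem.Dict String String
  | [], _, result => result
  | (code, name) :: rest, code_count, result =>
    -- if code in code_count: code_count[code] += 1 else: code_count[code] = 1
    let code_count' :=
      if code_count.contains code then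
        code_count.insert code (code_count.getD code 0 + 1)  -- key present: getD reads code_count[code]
      else
        code_count.insert code 1
    let cnt := code_count'.getD code 0  -- code_count[code], present after the update
    let key := if cnt > 1 then code ++ "_" ++ PySem.Int.toStr cnt else code
    pvALoop rest code_count' (result.insert key name)

def process_data_entries (data : List (String × String)) : List (String × String) :=
  (pvALoop data PySem.Dict.empty PySem.Dict.empty).items

-- ===== PORT B =====
-- stage 1: for i, (code, _name) in enumerate(entries): groups.setdefault(code, []).append(i)
def pvBGroups : List ((String × String) × Nat) → PySem.Dict String (List Nat) → PySem.Dict String (List Nat)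
  | [], groups => groups
  | (entry, i) :: rest, groups => pvBGroups rest (groups.modify entry.1 [] (· ++ [i]))

-- stage 2 inner loop: for rank, i in enumerate(idxs, start=1): keys[i] = code if rank == 1 else f"{code}_{rank}"
def pvBInner (code : String) : List (Nat × Nat) → List String → List String
  | [], keys => keys
  | (i, rank) :: rest, keys =>
      pvBInner code rest (keys.set i (if rank == 1 then code else code ++ "_" ++ PySem.Int.toStr (rank : Int)))

-- stage 2 outer loop: for code, idxs in groups.items(): …
def pvBOuter : List (String × List Nat) → List String → List String
  | [], keys => keys
  | (code, idxs) :: rest, keys => pvBOuter rest (pvBInner code (idxs.zipIdx 1) keys)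

-- stage 3: for key, (_code, name) in zip(keys, entries): result[key] = name
def pvBFinal : List (String × (String × String)) → PySem.Dict String String → PySem.Dict String String
  | [], result => result
  | (key, entry) :: rest, result => pvBFinal rest (result.insert key entry.2)

def process_data_entries_alt (data : List (String × String)) : List (String × String) :=
  let groups := pvBGroups (data.zipIdx 0) PySem.Dict.empty
  let keys := pvBOuter groups.items (List.replicate data.length "")
  (pvBFinal (keys.zip data) PySem.Dict.empty).items

-- ===== PRECONDITION & SPEC =====
def Spec_process_data_entries (data : List (String × String)) (out : List (String × String)) : Prop := out = process_data_entries_alt data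
instance (data : List (String × String)) (out : List (String × String)) : Decidable (Spec_process_data_entries data out) := by unfold Spec_process_data_entries; infer_instance

-- ===== CLAIM (what is proved, stated in full; the proofs are below) =====
def Claim_equal_process_data_entries : Prop := ∀ (data : List (String × String)), Dom_process_data_entries data → Spec_process_data_entries data (process_data_entries data)

-- ===== LEMMAS AND PROOFS =====

-- proof-side reference loop: A's loop with the counter replaced by the list of seen codes
def pvMidLoop : List (String × String) → List String → PySem.Dict String String → PySem.Dict String String
  | [], _, result => result
  | (code, name) :: rest, seen, result =>
    let seen' := seen ++ [code]
    let count : Int := PySem.List.count seen' code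
    let key := if count == 1 then code else code ++ "_" ++ PySem.Int.toStr count
    pvMidLoop rest seen' (result.insert key name)

-- the key both loops compute, as a function of the running count
def pvKeyOf (code : String) (cnt : Nat) : String :=
  if cnt = 1 then code else code ++ "_" ++ PySem.Int.toStr (cnt : Int)

-- reference key list: position i gets pvKeyOf from the count of its code in the seen prefix
def pvKsSpec : List String → List (String × String) → List String
  | _, [] => []
  | seen, (code, _) :: rest => pvKeyOf code ((seen ++ [code]).count code) :: pvKsSpec (seen ++ [code]) rest

-- occurrence positions (offset by k) of code c in the data list
def pvOcc (k : Nat) (data : List (String × String)) (c : String) : List Nat :=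
  ((data.zipIdx k).filter (fun p => p.1.1 == c)).map Prod.snd

theorem pvKeyOf_int (code : String) (cnt : Nat) :
    (if (cnt : Int) == 1 then code else code ++ "_" ++ PySem.Int.toStr (cnt : Int)) = pvKeyOf code cnt := by
  by_cases h : cnt = 1
  · simp [pvKeyOf, h]
  · have h' : ¬((cnt : Int) = 1) := by exact_mod_cast h
    simp [pvKeyOf, h, h']

theorem pvKeyOf_nat (code : String) (cnt : Nat) :
    (if cnt == 1 then code else code ++ "_" ++ PySem.Int.toStr (cnt : Int)) = pvKeyOf code cnt := by
  by_cases h : cnt = 1 <;> simp [pvKeyOf, h]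

-- A's loop equals the seen-list reference loop (counter invariant)
theorem pvALoop_eq_mid (entries : List (String × String)) (seen : List String)
    (cc : PySem.Dict String Int) (result : PySem.Dict String String)
    (h : ∀ c, cc.getD c 0 = (seen.count c : Int)) :
    pvALoop entries cc result = pvMidLoop entries seen result := by
  induction entries generalizing seen cc result with
  | nil => rfl
  | cons p rest ih =>
    obtain ⟨code, name⟩ := p
    have hcc : (if cc.contains code then cc.insert code (cc.getD code 0 + 1)
                else cc.insert code 1) = cc.insert code (cc.getD code 0 + 1) := by
      by_cases hc : cc.contains code
      · simp [hc]
      · have := PySem.Dict.getD_of_not_contains cc (k := code) 0 (by simpa using hc)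
        simp [hc, this]
    have hcnt : (cc.insert code (cc.getD code 0 + 1)).getD code 0
        = ((seen ++ [code]).count code : Int) := by
      rw [PySem.Dict.getD_insert_self, h]
      simp
    have hcount : (PySem.List.count (seen ++ [code]) code : Int)
        = ((seen ++ [code]).count code : Int) := by
      rw [PySem.List.count_eq]
    have hpos : (1 : Int) ≤ ((seen ++ [code]).count code : Int) := by
      have : 1 ≤ (seen ++ [code]).count code := by simp
      exact_mod_cast this
    show pvALoop rest _ _ = pvMidLoop rest _ _
    simp only [hcc]
    rw [ih (seen ++ [code]) _ _ ?_]
    · congr 2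
      rw [hcnt, hcount]
      rcases lt_or_eq_of_le hpos with hlt | heq
      · rw [if_pos hlt, if_neg (by simpa using (by omega : ¬ ((seen ++ [code]).count code : Int) = 1))]
      · rw [if_neg (by omega), if_pos (by simpa using heq.symm)]
    · intro c
      rw [PySem.Dict.getD_insert]
      by_cases hce : c = code
      · subst hce; rw [if_pos rfl, h]; simp
      · rw [if_neg hce, h]
        simp [List.count_append, Ne.symm hce]

-- the reference loop is the final fold over the reference key list
theorem pvMid_eq_final (entries : List (String × String)) (seen : List String)
    (result : PySem.Dict String String) :
    pvMidLoop entries seen result = pvBFinal ((pvKsSpec seen entries).zip entries) result := by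
  induction entries generalizing seen result with
  | nil => rfl
  | cons p rest ih =>
    obtain ⟨code, name⟩ := p
    show pvMidLoop rest _ (result.insert (if (PySem.List.count (seen ++ [code]) code : Int) == 1 then code
        else code ++ "_" ++ PySem.Int.toStr (PySem.List.count (seen ++ [code]) code : Int)) name) = _
    rw [PySem.List.count_eq, pvKeyOf_int, ih]
    simp only [pvKsSpec, List.zip_cons_cons, pvBFinal]

theorem pvKsSpec_length (entries : List (String × String)) (seen : List String) :
    (pvKsSpec seen entries).length = entries.length := by
  induction entries generalizing seen with
  | nil => rfl
  | cons p rest ih => obtain ⟨c, n⟩ := p; simp [pvKsSpec, ih]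

-- pointwise value of the reference key list
theorem pvKsSpec_getElem (entries : List (String × String)) (seen : List String) (i : Nat)
    (h : i < entries.length) :
    (pvKsSpec seen entries)[i]'(by rw [pvKsSpec_length]; exact h)
      = pvKeyOf (entries[i]'h).1
          ((seen ++ ((entries.map Prod.fst).take (i + 1))).count (entries[i]'h).1) := by
  induction entries generalizing seen i with
  | nil => simp at h
  | cons p rest ih =>
    obtain ⟨code, name⟩ := p
    cases i with
    | zero => simp [pvKsSpec]
    | succ j =>
      have hj : j < rest.length := by simpa using h
      simp only [pvKsSpec, List.getElem_cons_succ, List.map_cons, List.take_succ_cons]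
      rw [ih (seen ++ [code]) j hj]
      simp [List.append_assoc]

-- one step of pvOcc
theorem pvOcc_cons (k : Nat) (e : String × String) (rest : List (String × String)) (c : String) :
    pvOcc k (e :: rest) c = (if e.1 == c then [k] else []) ++ pvOcc (k + 1) rest c := by
  by_cases h : e.1 == c <;> simp [pvOcc, List.zipIdx_cons, h]

-- members of pvOcc are in-range occurrence positions of c
theorem pvOcc_mem (data : List (String × String)) (k x : Nat) (c : String) (hx : x ∈ pvOcc k data c) :
    k ≤ x ∧ ∃ h : x - k < data.length, (data[x - k]'h).1 = c := by
  induction data generalizing k with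
  | nil => simp [pvOcc] at hx
  | cons e rest ih =>
    rw [pvOcc_cons] at hx
    rcases List.mem_append.1 hx with h1 | h2
    · have hec : e.1 == c := by
        by_contra hb
        simp [hb] at h1
      have hxk : x = k := by
        simp [hec] at h1; exact h1
      subst hxk
      exact ⟨le_refl _, by simp, by simpa using of_decide_eq_true (by simpa using hec)⟩
    · obtain ⟨hk1, hlt, hval⟩ := ih (k + 1) h2
      refine ⟨by omega, ?_, ?_⟩
      · simpa using by omega
      · have hx1 : x - k = (x - (k + 1)) + 1 := by omega
        simp only [hx1, List.getElem_cons_succ]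
        exact hval

-- pvOcc is strictly increasing
theorem pvOcc_pairwise (data : List (String × String)) (k : Nat) (c : String) :
    (pvOcc k data c).Pairwise (· < ·) := by
  induction data generalizing k with
  | nil => simp [pvOcc]
  | cons e rest ih =>
    rw [pvOcc_cons]
    by_cases h : e.1 == c
    · simp only [h, if_pos]
      refine List.Pairwise.cons ?_ (ih (k + 1))
      intro y hy
      have := (pvOcc_mem rest (k + 1) y c hy).1
      omega
    · simpa [h] using ih (k + 1)

-- the rank of an occurrence inside its group is its running count
theorem pvOcc_rank (data : List (String × String)) (k i : Nat) (h : i < data.length) :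
    ∃ j, ∃ hj : j < (pvOcc k data (data[i]'h).1).length,
      (pvOcc k data (data[i]'h).1)[j]'hj = k + i ∧
        j + 1 = ((data.map Prod.fst).take (i + 1)).count (data[i]'h).1 := by
  induction data generalizing k i with
  | nil => simp at h
  | cons e rest ih =>
    cases i with
    | zero =>
      refine ⟨0, ?_, ?_, ?_⟩ <;> simp [pvOcc_cons]
    | succ j' =>
      have hj' : j' < rest.length := by simpa using h
      obtain ⟨j, hj, hv, hr⟩ := ih (k + 1) j' hj'
      simp only [List.getElem_cons_succ] at *
      by_cases hee : e.1 = (rest[j']'hj').1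
      · refine ⟨j + 1, ?_, ?_, ?_⟩
        · simp only [pvOcc_cons, hee, beq_self_eq_true, if_pos, List.length_append]
          simp; omega
        · simp only [pvOcc_cons, hee, beq_self_eq_true, if_pos, List.singleton_append,
            List.getElem_cons_succ]
          rw [hv]; omega
        · simp only [List.map_cons, List.take_succ_cons, List.count_cons, hee]
          rw [← hr]
          simp
      · refine ⟨j, ?_, ?_, ?_⟩
        · simpa [pvOcc_cons, hee] using hj
        · have hb : (e.1 == (rest[j']'hj').1) = false := beq_eq_false_iff_ne.2 (by simpa using hee)
          simp only [pvOcc_cons, hb, Bool.false_eq_true, if_false, List.nil_append]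
          rw [hv]; omega
        · simp only [List.map_cons, List.take_succ_cons, List.count_cons]
          rw [← hr]
          simp [hee]

theorem pvBInner_length (code : String) (l : List (Nat × Nat)) (ks : List String) :
    (pvBInner code l ks).length = ks.length := by
  induction l generalizing ks with
  | nil => rfl
  | cons p rest ih => obtain ⟨i, r⟩ := p; simp [pvBInner, ih]

-- the inner loop leaves untouched positions alone
theorem pvBInner_getElem_ne (code : String) (l : List (Nat × Nat)) (ks : List String) (i : Nat)
    (hne : ∀ p ∈ l, p.1 ≠ i) :
    (pvBInner code l ks)[i]? = ks[i]? := by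
  induction l generalizing ks with
  | nil => rfl
  | cons p rest ih =>
    obtain ⟨i0, r0⟩ := p
    have h0 : i0 ≠ i := hne (i0, r0) (by simp)
    simp only [pvBInner]
    rw [ih _ (fun q hq => hne q (by simp [hq]))]
    simp [List.getElem?_set_ne h0]

-- the inner loop writes the key of the pair that mentions position i
theorem pvBInner_getElem_mem (code : String) (l : List (Nat × Nat)) (ks : List String)
    (i r : Nat) (hi : i < ks.length) (hmem : (i, r) ∈ l) (hnd : (l.map Prod.fst).Nodup) :
    (pvBInner code l ks)[i]? = some (pvKeyOf code r) := by
  induction l generalizing ks with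
  | nil => simp at hmem
  | cons p rest ih =>
    obtain ⟨i0, r0⟩ := p
    simp only [List.map_cons, List.nodup_cons] at hnd
    rcases List.mem_cons.1 hmem with heq | hrest
    · have h1 : i = i0 := congrArg Prod.fst heq
      have h2 : r = r0 := congrArg Prod.snd heq
      subst h1; subst h2
      simp only [pvBInner]
      rw [pvBInner_getElem_ne code rest _ i ?_]
      · rw [List.getElem?_set_self (by simpa using hi)]
        rw [pvKeyOf_nat]
      · intro q hq hq1
        exact hnd.1 (by simpa [hq1] using List.mem_map_of_mem (f := Prod.fst) hq)
    · have hne : i0 ≠ i := by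
        intro hcontra; subst hcontra
        exact hnd.1 (by simpa using List.mem_map_of_mem (f := Prod.fst) hrest)
      simp only [pvBInner]
      exact ih _ (by simpa using hi) hrest hnd.2

theorem pvBOuter_length (items : List (String × List Nat)) (ks : List String) :
    (pvBOuter items ks).length = ks.length := by
  induction items generalizing ks with
  | nil => rfl
  | cons p rest ih => obtain ⟨c, idxs⟩ := p; simp [pvBOuter, ih, pvBInner_length]

-- pointwise value of the staged key array
theorem pvBOuter_getElem (data : List (String × String)) (cs : List String) (ks : List String)
    (i : Nat) (hlen : ks.length = data.length) (hi : i < data.length) :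
    (pvBOuter (cs.map (fun c => (c, pvOcc 0 data c))) ks)[i]? =
      if (data[i]'hi).1 ∈ cs then
        some (pvKeyOf (data[i]'hi).1 (((data.map Prod.fst).take (i + 1)).count (data[i]'hi).1))
      else ks[i]? := by
  induction cs generalizing ks with
  | nil => simp [pvBOuter]
  | cons c cs' ih =>
    simp only [List.map_cons, pvBOuter]
    have hlen' : (pvBInner c ((pvOcc 0 data c).zipIdx 1) ks).length = data.length := by
      rw [pvBInner_length]; exact hlen
    by_cases hc : (data[i]'hi).1 = c
    · subst hc
      obtain ⟨j, hj, hv, hr⟩ := pvOcc_rank data 0 i hi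
      have hjz : j < (((pvOcc 0 data (data[i]'hi).1).zipIdx 1)).length := by simpa using hj
      have hpair : ((pvOcc 0 data (data[i]'hi).1).zipIdx 1)[j]'hjz = (i, 1 + j) := by
        rw [List.getElem_zipIdx]
        simp only [Nat.zero_add] at hv
        simp [hv]
      have hmem : (i, 1 + j) ∈ (pvOcc 0 data (data[i]'hi).1).zipIdx 1 :=
        hpair ▸ List.getElem_mem hjz
      have hnd : (((pvOcc 0 data (data[i]'hi).1).zipIdx 1).map Prod.fst).Nodup := by
        rw [List.zipIdx_map_fst]
        exact (pvOcc_pairwise data 0 (data[i]'hi).1).imp (fun hlt => Nat.ne_of_lt hlt)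
      have hwrite := pvBInner_getElem_mem (data[i]'hi).1 _ ks i (1 + j)
        (by rw [hlen]; exact hi) hmem hnd
      rw [ih _ hlen']
      by_cases hmem' : (data[i]'hi).1 ∈ cs'
      · simp [hmem']
      · rw [if_neg hmem', hwrite, Nat.add_comm 1 j, hr]
        simp
    · have hne : ∀ p ∈ (pvOcc 0 data c).zipIdx 1, p.1 ≠ i := by
        intro p hp hpi
        have hp1 : p.1 ∈ pvOcc 0 data c := by
          have := List.mem_map_of_mem (f := Prod.fst) hp
          rwa [List.zipIdx_map_fst] at this
        obtain ⟨-, hlt, hval⟩ := pvOcc_mem data 0 p.1 c hp1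
        simp only [hpi, Nat.sub_zero] at hval
        exact hc hval
      rw [ih _ hlen', pvBInner_getElem_ne c _ ks i hne]
      simp [List.mem_cons, hc]

-- the stage-1 loop is a left fold
theorem pvBGroups_eq_foldl (l : List ((String × String) × Nat)) (d : PySem.Dict String (List Nat)) :
    pvBGroups l d = l.foldl (fun d p => d.modify p.1.1 [] (· ++ [p.2])) d := by
  induction l generalizing d with
  | nil => rfl
  | cons p rest ih => obtain ⟨e, i⟩ := p; simp [pvBGroups, ih]

-- groups maps every code to its occurrence-index list
theorem pvBGroups_getD (data : List (String × String)) (c : String) :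
    (pvBGroups (data.zipIdx 0) PySem.Dict.empty).getD c [] = pvOcc 0 data c := by
  rw [pvBGroups_eq_foldl]
  have := PySem.Dict.getD_foldl_modify_append
    (l := (data.zipIdx 0).map (fun p => (p.1.1, p.2))) (c := c)
    (d := (PySem.Dict.empty : PySem.Dict String (List Nat)))
  rw [List.foldl_map] at this
  rw [this]
  simp [pvOcc, List.filter_map, List.map_map, Function.comp_def]

theorem pvBGroups_keys (data : List (String × String)) :
    (pvBGroups (data.zipIdx 0) PySem.Dict.empty).keys
      = PySem.Set.ofList ((data.zipIdx 0).map (fun p => p.1.1)) := by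
  rw [pvBGroups_eq_foldl]
  rw [PySem.Dict.keys_foldl_modify_key (data.zipIdx 0) (fun p => p.1.1) [] (fun _ p => (· ++ [p.2]))]
  rw [PySem.Dict.keys_empty, PySem.Set.update_nil_left]

theorem pvBGroups_nodup_keys (data : List (String × String)) :
    (pvBGroups (data.zipIdx 0) PySem.Dict.empty).keys.Nodup := by
  rw [pvBGroups_eq_foldl]
  exact PySem.Dict.nodup_keys_foldl_modify_key (data.zipIdx 0) (fun p => p.1.1) [] (fun _ p => (· ++ [p.2]))
    PySem.Dict.empty (by simp [PySem.Dict.keys_empty])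

theorem pvBGroups_items (data : List (String × String)) :
    (pvBGroups (data.zipIdx 0) PySem.Dict.empty).items
      = (pvBGroups (data.zipIdx 0) PySem.Dict.empty).keys.map (fun c => (c, pvOcc 0 data c)) := by
  have h := PySem.Dict.items_eq_map_keys (pvBGroups (data.zipIdx 0) PySem.Dict.empty)
    (pvBGroups_nodup_keys data) []
  rw [h]
  apply List.map_congr_left
  intro c _
  rw [pvBGroups_getD]

-- the staged key array is the reference key list
theorem pvKeys_eq (data : List (String × String)) :
    pvBOuter (pvBGroups (data.zipIdx 0) PySem.Dict.empty).items (List.replicate data.length "")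
      = pvKsSpec [] data := by
  apply List.ext_getElem?
  intro i
  by_cases hi : i < data.length
  · rw [pvBGroups_items]
    rw [pvBOuter_getElem data _ _ i (by simp) hi]
    have hmem : (data[i]'hi).1 ∈ (pvBGroups (data.zipIdx 0) PySem.Dict.empty).keys := by
      rw [pvBGroups_keys, PySem.Set.mem_ofList]
      have hz : (data.zipIdx 0)[i]'(by simpa using hi) = (data[i]'hi, 0 + i) :=
        List.getElem_zipIdx _
      have : (data[i]'hi, 0 + i) ∈ data.zipIdx 0 := hz ▸ List.getElem_mem _
      simpa using List.mem_map_of_mem (f := fun p => p.1.1) this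
    rw [if_pos hmem]
    rw [List.getElem?_eq_getElem (by rw [pvKsSpec_length]; exact hi)]
    rw [pvKsSpec_getElem data [] i hi]
    simp
  · rw [List.getElem?_eq_none, List.getElem?_eq_none]
    · rw [pvKsSpec_length]; omega
    · rw [pvBOuter_length, List.length_replicate]; omega

-- ===== VERDICT (by name: the statement is the Claim_ definition above) =====
theorem process_data_entries_spec : Claim_equal_process_data_entries := by
  intro data _
  unfold Spec_process_data_entries process_data_entries process_data_entries_alt
  simp only []
  rw [pvKeys_eq]
  rw [pvALoop_eq_mid data [] PySem.Dict.empty PySem.Dict.empty (fun c => by simp)]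
  rw [pvMid_eq_final]
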